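-- pv_equiv track=rewrite | github.com/Anak-2/AlgorithmProblem | CodeJam 2022 qual/punchCards.py | makePlusMinus
-- ===== SOURCE A (Python) =====
-- def makePlusMinus(c):
--     plusMinus = []
--     for i in range(c):
--         if i%2 == 0:
--             plusMinus.append('+')
--         else:
--             plusMinus.append('-')
--     return plusMinus
-- ===== SOURCE B (Python) =====
-- def makePlusMinus(c):
--     n = (c + 1) // 2
--     return (['+', '-'] * n)[:c]
-- ===== Notes on version B (the rewrite author's own statement) =====
-- stated objective: simpler
-- what changed: Replaces the index loop with its parity branch by a closed-form construction: tile the two-element pattern the required number of times and slice to the requested length.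
import Mathlib
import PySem

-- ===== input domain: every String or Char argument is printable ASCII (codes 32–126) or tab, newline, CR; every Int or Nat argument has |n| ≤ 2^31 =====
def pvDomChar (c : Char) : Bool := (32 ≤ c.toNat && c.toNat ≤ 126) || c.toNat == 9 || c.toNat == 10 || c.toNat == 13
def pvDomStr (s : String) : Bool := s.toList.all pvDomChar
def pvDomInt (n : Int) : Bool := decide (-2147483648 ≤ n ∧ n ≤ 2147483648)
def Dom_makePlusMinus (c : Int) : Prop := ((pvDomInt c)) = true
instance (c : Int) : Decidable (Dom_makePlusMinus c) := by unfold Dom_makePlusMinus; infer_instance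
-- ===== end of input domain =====

-- B replaces the index loop with its i%2 branch by a closed-form construction:
-- tile ['+','-'] (c+1)//2 times and slice to length c (objective: simpler).

-- ===== PORT A =====
def makePlusMinus (c : Int) : List String :=
  (PySem.List.pyRange 0 c 1).foldl
    (fun plusMinus i =>
      if PySem.Int.mod i 2 = 0 then plusMinus ++ ["+"] else plusMinus ++ ["-"]) []

-- ===== PORT B =====
def makePlusMinus_alt (c : Int) : List String :=
  let n := PySem.Int.floordiv (c + 1) 2
  PySem.List.slice (List.flatten (List.replicate n.toNat ["+", "-"])) none (some c)

-- ===== PRECONDITION & SPEC =====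
def Spec_makePlusMinus (c : Int) (out : List String) : Prop := out = makePlusMinus_alt c
instance (c : Int) (out : List String) : Decidable (Spec_makePlusMinus c out) := by unfold Spec_makePlusMinus; infer_instance

-- ===== CLAIM (what is proved, stated in full; the proofs are below) =====
def Claim_equal_makePlusMinus : Prop := ∀ (c : Int), Dom_makePlusMinus c → Spec_makePlusMinus c (makePlusMinus c)

-- ===== LEMMAS AND PROOFS =====

def pvSign (i : Int) : String := if PySem.Int.mod i 2 = 0 then "+" else "-"

theorem pvA_eq_map (c : Int) :
    makePlusMinus c = (PySem.List.pyRange 0 c 1).map pvSign := by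
  unfold makePlusMinus
  have h : ∀ (l : List Int) (acc : List String),
      l.foldl (fun plusMinus i =>
        if PySem.Int.mod i 2 = 0 then plusMinus ++ ["+"] else plusMinus ++ ["-"]) acc
      = acc ++ l.map pvSign := by
    intro l
    induction l with
    | nil => intro acc; simp
    | cons x xs ih =>
      intro acc
      simp only [List.foldl_cons, List.map_cons, ih, pvSign]
      split <;> simp
  simpa using h (PySem.List.pyRange 0 c 1) []

theorem pvMap_even (k : Nat) :
    (PySem.List.pyRange 0 (2 * (k : Int)) 1).map pvSign
      = List.flatten (List.replicate k ["+", "-"]) := by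
  induction k with
  | zero => simp [PySem.List.pyRange_one_eq_nil]
  | succ k ih =>
    have h1 : (2 : Int) * (k + 1 : Nat) = (2 * (k : Int) + 1) + 1 := by push_cast; ring
    rw [h1, PySem.List.pyRange_one_succ_right (by omega),
        PySem.List.pyRange_one_succ_right (by omega)]
    have e1 : pvSign (2 * (k : Int)) = "+" := by
      simp [pvSign, Int.mul_emod_right]
    have e2 : pvSign (2 * (k : Int) + 1) = "-" := by
      simp [pvSign]
    simp [ih, e1, e2, List.replicate_succ' , List.flatten_append]

theorem pvLen_flat (k : Nat) :
    (List.flatten (List.replicate k (["+", "-"] : List String))).length = 2 * k := by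
  induction k with
  | zero => simp
  | succ k ih => simp [List.replicate_succ, ih]; ring

theorem pvB_spec (m : Nat) :
    makePlusMinus_alt (m : Int) =
      (List.flatten (List.replicate ((m + 1) / 2) (["+", "-"] : List String))).take m := by
  have h : PySem.Int.floordiv ((m : Int) + 1) 2 = (((m + 1) / 2 : Nat) : Int) := by
    have := PySem.Int.floordiv_natCast (m + 1) 2
    push_cast at this ⊢
    omega
  show PySem.List.slice
      (List.flatten (List.replicate (PySem.Int.floordiv ((m : Int) + 1) 2).toNat ["+", "-"]))
      none (some (m : Int)) = _
  rw [h, PySem.List.slice_to_natCast]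
  simp only [Int.toNat_natCast]

theorem makePlusMinus_spec' (c : Int) : makePlusMinus c = makePlusMinus_alt c := by
  rcases Int.lt_or_le c 0 with hneg | hpos
  · -- c < 0: both empty
    rw [pvA_eq_map, PySem.List.pyRange_one_eq_nil (by omega)]
    have hle : PySem.Int.floordiv (c + 1) 2 ≤ 0 := by
      have := (PySem.Int.floordiv_lt_iff_lt_mul (a := c + 1) (b := 2) (q := 1) (by omega)).2 (by omega)
      omega
    have hz : (PySem.Int.floordiv (c + 1) 2).toNat = 0 := by omega
    have hempty : makePlusMinus_alt c = PySem.List.slice ([] : List String) none (some c) := by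
      show PySem.List.slice
          (List.flatten (List.replicate (PySem.Int.floordiv (c + 1) 2).toNat ["+", "-"]))
          none (some c) = _
      rw [hz]
      rfl
    rw [hempty]
    simp [PySem.List.slice]
  · obtain ⟨m, rfl⟩ := Int.eq_ofNat_of_zero_le hpos
    rw [pvB_spec m, pvA_eq_map]
    rcases Nat.even_or_odd m with ⟨k, hk⟩ | ⟨k, hk⟩
    · subst hk
      have hm : ((k + k : Nat) : Int) = 2 * (k : Int) := by push_cast; ring
      rw [hm, pvMap_even k]
      have hd : (k + k + 1) / 2 = k := by omega
      rw [hd, List.take_of_length_le (by rw [pvLen_flat]; omega)]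
    · subst hk
      have hm : ((2 * k + 1 : Nat) : Int) = 2 * (k : Int) + 1 := by push_cast; ring
      rw [hm, PySem.List.pyRange_one_succ_right (by omega), List.map_append, pvMap_even k]
      have hd : (2 * k + 1 + 1) / 2 = k + 1 := by omega
      rw [hd]
      have e1 : pvSign (2 * (k : Int)) = "+" := by
        simp [pvSign, Int.mul_emod_right]
      rw [List.replicate_succ', List.flatten_append,
          List.take_append, pvLen_flat,
          List.take_of_length_le (by rw [pvLen_flat]; omega)]
      simp [e1]
      rfl

-- ===== VERDICT (by name: the statement is the Claim_ definition above) =====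
theorem makePlusMinus_spec : Claim_equal_makePlusMinus := by
  intro c _
  exact makePlusMinus_spec' c
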